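-- pv_equiv track=rewrite | github.com/dhtaber/Phrazagram | python_scripts/word_grid_solver_general_V10.py | slot_purity_ok
-- ===== SOURCE A (Python) =====
-- def horizontal_segment_for_width(w, L):
--     start = (w - L) // 2
--     end = start + L - 1
--     return start, end
--
-- def slot_purity_ok(h_rows_with_len, v_cols_with_seg, w):
--     """
--     Enforce BOTH purities:
--       - Across row purity: On a row r with across span [cs..ce], there must be no filled cells
--         outside [cs..ce] on that row.
--       - Down column purity: On a column c with down span [s..e], there must be no filled cells
--         outside [s..e] in that column.
--     Implemented by checking H x V consistency both when c is inside [cs..ce] and when it is outside.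
--     """
--     if not h_rows_with_len and not v_cols_with_seg:
--         return False
--
--     # Precompute row spans for across
--     row_to_span = {}
--     for (r, Lh) in h_rows_with_len:
--         cs, ce = horizontal_segment_for_width(w, Lh)
--         row_to_span[r] = (cs, ce)
--
--     # Check every (r,c) where one orientation exists implies the other respects purity
--     for c,(s,L) in v_cols_with_seg.items():
--         e = s + L - 1
--         for r,(cs,ce) in row_to_span.items():
--             if cs <= c <= ce:
--                 # crossing allowed, but only if row r is within vertical span
--                 if not (s <= r <= e):
--                     return False
--             else:
--                 # vertical cannot place a filled cell on this H-row outside the across span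
--                 if s <= r <= e:
--                     return False
--
--     # Also ensure that for vertical purity: if a row r is outside [s..e], the across must not cover c
--     # (already implied by the else-branch above), and for across purity: if c inside [cs..ce], we enforced s<=r<=e.
--     return True
-- ===== SOURCE B (Python) =====
-- def slot_purity_ok(h_rows_with_len, v_cols_with_seg, w):
--     if not h_rows_with_len and not v_cols_with_seg:
--         return False
--     row_to_span = {}
--     for (r, Lh) in h_rows_with_len:
--         cs = (w - Lh) // 2
--         row_to_span[r] = (cs, cs + Lh - 1)
--     for r, (cs, ce) in row_to_span.items():
--         across_cols = {c for c in v_cols_with_seg if cs <= c <= ce}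
--         down_cols = {c for c, (s, L) in v_cols_with_seg.items() if s <= r <= s + L - 1}
--         if across_cols != down_cols:
--             return False
--     return True
-- ===== Notes on version B (the rewrite author's own statement) =====
-- stated objective: alternative
-- what changed: Instead of A's column-outer per-cell XNOR check, B iterates once over the rows and for each row materialises the set of vertical columns inside the across span and the set of vertical columns whose down span covers the row, failing on the first row where the two sets differ.
import Mathlib
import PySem

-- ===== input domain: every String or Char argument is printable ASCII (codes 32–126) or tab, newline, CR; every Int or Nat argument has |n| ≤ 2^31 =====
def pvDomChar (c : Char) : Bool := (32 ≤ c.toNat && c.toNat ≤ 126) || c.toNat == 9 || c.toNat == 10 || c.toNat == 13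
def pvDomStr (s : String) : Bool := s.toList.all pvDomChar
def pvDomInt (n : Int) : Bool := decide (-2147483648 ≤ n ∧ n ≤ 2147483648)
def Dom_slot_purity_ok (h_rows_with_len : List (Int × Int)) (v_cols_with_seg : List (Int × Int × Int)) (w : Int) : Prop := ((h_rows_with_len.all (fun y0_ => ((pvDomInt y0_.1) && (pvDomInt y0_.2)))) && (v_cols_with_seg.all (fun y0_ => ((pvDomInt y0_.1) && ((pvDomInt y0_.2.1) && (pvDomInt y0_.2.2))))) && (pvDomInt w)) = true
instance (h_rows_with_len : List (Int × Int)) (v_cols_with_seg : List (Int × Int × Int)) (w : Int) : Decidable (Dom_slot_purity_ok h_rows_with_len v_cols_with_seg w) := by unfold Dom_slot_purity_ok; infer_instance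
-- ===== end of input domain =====

-- B replaces A's column-outer per-cell XNOR test by a single pass over the rows comparing,
-- per row, the set of vertical columns inside the across span with the set of vertical
-- columns whose down span covers the row (objective: alternative decomposition).

-- ===== PORT A =====
-- helper horizontal_segment_for_width, kept as in the Python
def horizontal_segment_for_width (w : Int) (L : Int) : Int × Int :=
  let start := PySem.Int.floordiv (w - L) 2
  (start, start + L - 1)

-- row_to_span precomputation shared by both Pythons (same code in Source A and Source B)
def pvRowToSpan (h_rows_with_len : List (Int × Int)) (w : Int) : PySem.Dict Int (Int × Int) :=
  h_rows_with_len.foldl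
    (fun d p =>
      let cs_ce := horizontal_segment_for_width w p.2
      d.insert p.1 cs_ce)
    PySem.Dict.empty

def slot_purity_ok (h_rows_with_len : List (Int × Int)) (v_cols_with_seg : List (Int × Int × Int)) (w : Int) : Bool :=
  if h_rows_with_len = [] ∧ v_cols_with_seg = [] then false
  else
    let row_to_span := pvRowToSpan h_rows_with_len w
    -- for c,(s,L) in v_cols_with_seg.items(): … early 'return False' = Bool all
    v_cols_with_seg.all (fun q =>
      let c := q.1
      let s := q.2.1
      let e := s + q.2.2 - 1
      row_to_span.items.all (fun p =>
        let r := p.1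
        let cs := p.2.1
        let ce := p.2.2
        if cs ≤ c ∧ c ≤ ce then decide (s ≤ r ∧ r ≤ e)
        else !decide (s ≤ r ∧ r ≤ e)))

-- ===== PORT B =====
def slot_purity_ok_alt (h_rows_with_len : List (Int × Int)) (v_cols_with_seg : List (Int × Int × Int)) (w : Int) : Bool :=
  if h_rows_with_len = [] ∧ v_cols_with_seg = [] then false
  else
    let row_to_span := pvRowToSpan h_rows_with_len w
    row_to_span.items.all (fun p =>
      let r := p.1
      let cs := p.2.1
      let ce := p.2.2
      let across_cols : PySem.Set Int :=
        PySem.Set.ofList ((v_cols_with_seg.map Prod.fst).filter (fun c => decide (cs ≤ c ∧ c ≤ ce)))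
      let down_cols : PySem.Set Int :=
        PySem.Set.ofList ((v_cols_with_seg.filter (fun q => decide (q.2.1 ≤ r ∧ r ≤ q.2.1 + q.2.2 - 1))).map Prod.fst)
      PySem.Set.equal across_cols down_cols)

-- ===== PRECONDITION & SPEC =====
-- Pre_ requires the keys of v_cols_with_seg to be distinct: in Python this argument is a dict,
-- so a duplicate-key association list represents no Python input at all.
def Pre_slot_purity_ok (h_rows_with_len : List (Int × Int)) (v_cols_with_seg : List (Int × Int × Int)) (w : Int) : Prop :=
  (v_cols_with_seg.map Prod.fst).Nodup
instance (h_rows_with_len : List (Int × Int)) (v_cols_with_seg : List (Int × Int × Int)) (w : Int) : Decidable (Pre_slot_purity_ok h_rows_with_len v_cols_with_seg w) := by unfold Pre_slot_purity_ok; infer_instance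

def pvWitness_slot_purity_ok : (List (Int × Int)) × (List (Int × Int × Int)) × Int := ([(0, 3)], [(0, 0, 1)], 3)

def Spec_slot_purity_ok (h_rows_with_len : List (Int × Int)) (v_cols_with_seg : List (Int × Int × Int)) (w : Int) (out : Bool) : Prop := out = slot_purity_ok_alt h_rows_with_len v_cols_with_seg w
instance (h_rows_with_len : List (Int × Int)) (v_cols_with_seg : List (Int × Int × Int)) (w : Int) (out : Bool) : Decidable (Spec_slot_purity_ok h_rows_with_len v_cols_with_seg w out) := by unfold Spec_slot_purity_ok; infer_instance

-- ===== CLAIM (what is proved, stated in full; the proofs are below) =====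
def Claim_equal_slot_purity_ok : Prop := ∀ (h_rows_with_len : List (Int × Int)) (v_cols_with_seg : List (Int × Int × Int)) (w : Int), Dom_slot_purity_ok h_rows_with_len v_cols_with_seg w → Pre_slot_purity_ok h_rows_with_len v_cols_with_seg w → Spec_slot_purity_ok h_rows_with_len v_cols_with_seg w (slot_purity_ok h_rows_with_len v_cols_with_seg w)

-- ===== LEMMAS AND PROOFS =====

-- per-row equivalence: the inner all of A's XNOR over the vertical entries equals B's
-- set comparison, given distinct vertical keys
theorem pv_row_eq (V : List (Int × Int × Int)) (hnd : (V.map Prod.fst).Nodup)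
    (r cs ce : Int) :
    (V.all (fun q =>
        if cs ≤ q.1 ∧ q.1 ≤ ce then decide (q.2.1 ≤ r ∧ r ≤ q.2.1 + q.2.2 - 1)
        else !decide (q.2.1 ≤ r ∧ r ≤ q.2.1 + q.2.2 - 1)))
    = PySem.Set.equal
        (PySem.Set.ofList ((V.map Prod.fst).filter (fun c => decide (cs ≤ c ∧ c ≤ ce))))
        (PySem.Set.ofList ((V.filter (fun q => decide (q.2.1 ≤ r ∧ r ≤ q.2.1 + q.2.2 - 1))).map Prod.fst)) := by
  rw [Bool.eq_iff_iff]
  simp only [List.all_eq_true, PySem.Set.equal_iff, PySem.Set.mem_ofList,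
    List.mem_filter, List.mem_map, decide_eq_true_eq]
  constructor
  · intro hall x
    constructor
    · rintro ⟨⟨q, hqV, hqx⟩, hx⟩
      refine ⟨q, ⟨hqV, ?_⟩, hqx⟩
      have := hall q hqV
      rw [if_pos (hqx ▸ hx)] at this
      simpa using this
    · rintro ⟨q, ⟨hqV, hsp⟩, hqx⟩
      refine ⟨⟨q, hqV, hqx⟩, ?_⟩
      have := hall q hqV
      by_contra hout
      rw [hqx, if_neg hout] at this
      simp only [Bool.not_eq_eq_eq_not, Bool.not_true, decide_eq_false_iff_not] at this
      exact this hsp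
  · intro hsets q hqV
    by_cases hin : cs ≤ q.1 ∧ q.1 ≤ ce
    · rw [if_pos hin]
      have : ∃ q' ∈ V, (q'.2.1 ≤ r ∧ r ≤ q'.2.1 + q'.2.2 - 1) ∧ q'.1 = q.1 := by
        have := (hsets q.1).mp ⟨⟨q, hqV, rfl⟩, hin⟩
        obtain ⟨q', ⟨hq'V, hsp⟩, hq'x⟩ := this
        exact ⟨q', hq'V, hsp, hq'x⟩
      obtain ⟨q', hq'V, hsp, hkey⟩ := this
      have : q' = q := List.inj_on_of_nodup_map hnd hq'V hqV hkey
      subst this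
      simpa using hsp
    · rw [if_neg hin]
      simp only [Bool.not_eq_eq_eq_not, Bool.not_true, decide_eq_false_iff_not]
      intro hsp
      have : (∃ q' ∈ V, q'.1 = q.1) ∧ (cs ≤ q.1 ∧ q.1 ≤ ce) :=
        (hsets q.1).mpr ⟨q, ⟨hqV, hsp⟩, rfl⟩
      exact hin this.2

-- swapping the two 'all' loops
theorem pv_all_comm {α β : Type} (xs : List α) (ys : List β) (P : α → β → Bool) :
    (xs.all fun x => ys.all fun y => P x y) = (ys.all fun y => xs.all fun x => P x y) := by
  rw [Bool.eq_iff_iff]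
  simp only [List.all_eq_true]
  tauto

-- ===== VERDICT (by name: the statement is the Claim_ definition above) =====
theorem slot_purity_ok_spec : Claim_equal_slot_purity_ok := by
  intro h v w _ hpre
  unfold Spec_slot_purity_ok slot_purity_ok slot_purity_ok_alt
  by_cases hempty : h = [] ∧ v = []
  · rw [if_pos hempty, if_pos hempty]
  · rw [if_neg hempty, if_neg hempty]
    rw [pv_all_comm]
    congr 1
    funext p
    exact pv_row_eq v hpre p.1 p.2.1 p.2.2
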